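-- pv_equiv track=rewrite | github.com/beforefxlt/qa-prompts | family_health_record_app/scripts/check_docs_alignment.py | analyze_code_changes
-- ===== SOURCE A (Python) =====
-- from typing import List, Dict, Set
--
-- def analyze_code_changes(files: List[str]) -> Dict[str, bool]:
--     """分析代码变更涉及的类型"""
--     changes = {
--         "routers": False,
--         "schemas": False,
--         "models": False,
--         "services": False,
--         "components": False,
--         "pages": False,
--         "hooks": False,
--         "api": False,
--         "mobile_app": False,
--     }
--
--     for f in files:
--         f_lower = f.lower()
--         if "routers" in f_lower or "/api/" in f_lower:
--             changes["routers"] = True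
--         if "schemas" in f_lower:
--             changes["schemas"] = True
--         if "models" in f_lower:
--             changes["models"] = True
--         if "services" in f_lower:
--             changes["services"] = True
--         if "components" in f_lower:
--             changes["components"] = True
--         if "page" in f_lower and ".tsx" in f_lower:
--             changes["pages"] = True
--         if "hooks" in f_lower:
--             changes["hooks"] = True
--         if "/api/" in f_lower or "apiclient" in f_lower:
--             changes["api"] = True
--         if "mobile_app" in f_lower:
--             changes["mobile_app"] = True
--
--     return changes
-- ===== SOURCE B (Python) =====
-- from typing import List, Dict
--
-- def analyze_code_changes(files: List[str]) -> Dict[str, bool]: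
--     """分析代码变更涉及的类型 — one independent scan per category instead of one pass over files."""
--     fl = [f.lower() for f in files]
--     return {
--         "routers": any("routers" in s or "/api/" in s for s in fl),
--         "schemas": any("schemas" in s for s in fl),
--         "models": any("models" in s for s in fl),
--         "services": any("services" in s for s in fl),
--         "components": any("components" in s for s in fl),
--         "pages": any("page" in s and ".tsx" in s for s in fl),
--         "hooks": any("hooks" in s for s in fl),
--         "api": any("/api/" in s or "apiclient" in s for s in fl),
--         "mobile_app": any("mobile_app" in s for s in fl),
--     }
-- ===== Notes on version B (the rewrite author's own statement) =====
-- stated objective: simpler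
-- what changed: Replaces the single pass that mutates a 9-flag dict with one independent any()-scan per category over the pre-lowered file list, building the result dict in a single literal.
import Mathlib
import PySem

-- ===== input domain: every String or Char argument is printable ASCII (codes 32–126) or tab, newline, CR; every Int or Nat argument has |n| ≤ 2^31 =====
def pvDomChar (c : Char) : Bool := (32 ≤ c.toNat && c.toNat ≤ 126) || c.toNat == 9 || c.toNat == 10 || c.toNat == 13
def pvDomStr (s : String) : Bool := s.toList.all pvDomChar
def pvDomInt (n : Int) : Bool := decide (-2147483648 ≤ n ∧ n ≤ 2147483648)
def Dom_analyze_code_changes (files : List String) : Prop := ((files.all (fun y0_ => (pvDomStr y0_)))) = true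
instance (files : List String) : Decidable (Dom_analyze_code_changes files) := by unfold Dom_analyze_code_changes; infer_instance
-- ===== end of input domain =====

-- B replaces A's single mutating pass over files with one independent any()-scan per category (simpler decomposition, same cost).


-- ===== PORT A =====
-- A's loop state: the nine flags of the `changes` dict, in key order.
def pvStateA := Bool × Bool × Bool × Bool × Bool × Bool × Bool × Bool × Bool

-- one iteration of A's `for f in files` body (each `if … : changes[k] = True` is `flag || cond`)
def pvStepA (st : pvStateA) (f : String) : pvStateA :=
  let fl := PySem.Str.lower f
  ⟨st.1 || (PySem.Str.isIn "routers" fl || PySem.Str.isIn "/api/" fl),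
   st.2.1 || PySem.Str.isIn "schemas" fl,
   st.2.2.1 || PySem.Str.isIn "models" fl,
   st.2.2.2.1 || PySem.Str.isIn "services" fl,
   st.2.2.2.2.1 || PySem.Str.isIn "components" fl,
   st.2.2.2.2.2.1 || (PySem.Str.isIn "page" fl && PySem.Str.isIn ".tsx" fl),
   st.2.2.2.2.2.2.1 || PySem.Str.isIn "hooks" fl,
   st.2.2.2.2.2.2.2.1 || (PySem.Str.isIn "/api/" fl || PySem.Str.isIn "apiclient" fl),
   st.2.2.2.2.2.2.2.2 || PySem.Str.isIn "mobile_app" fl⟩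

def analyze_code_changes (files : List String) : List (String × Bool) :=
  let s := files.foldl pvStepA ⟨false, false, false, false, false, false, false, false, false⟩
  [("routers", s.1), ("schemas", s.2.1), ("models", s.2.2.1), ("services", s.2.2.2.1),
   ("components", s.2.2.2.2.1), ("pages", s.2.2.2.2.2.1), ("hooks", s.2.2.2.2.2.2.1),
   ("api", s.2.2.2.2.2.2.2.1), ("mobile_app", s.2.2.2.2.2.2.2.2)]

-- ===== PORT B =====
def analyze_code_changes_alt (files : List String) : List (String × Bool) :=
  let fl := files.map PySem.Str.lower
  [("routers", fl.any (fun s => PySem.Str.isIn "routers" s || PySem.Str.isIn "/api/" s)),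
   ("schemas", fl.any (fun s => PySem.Str.isIn "schemas" s)),
   ("models", fl.any (fun s => PySem.Str.isIn "models" s)),
   ("services", fl.any (fun s => PySem.Str.isIn "services" s)),
   ("components", fl.any (fun s => PySem.Str.isIn "components" s)),
   ("pages", fl.any (fun s => PySem.Str.isIn "page" s && PySem.Str.isIn ".tsx" s)),
   ("hooks", fl.any (fun s => PySem.Str.isIn "hooks" s)),
   ("api", fl.any (fun s => PySem.Str.isIn "/api/" s || PySem.Str.isIn "apiclient" s)),
   ("mobile_app", fl.any (fun s => PySem.Str.isIn "mobile_app" s))]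

-- ===== PRECONDITION & SPEC =====
def Spec_analyze_code_changes (files : List String) (out : List (String × Bool)) : Prop := out = analyze_code_changes_alt files
instance (files : List String) (out : List (String × Bool)) : Decidable (Spec_analyze_code_changes files out) := by unfold Spec_analyze_code_changes; infer_instance

-- ===== CLAIM (what is proved, stated in full; the proofs are below) =====
def Claim_equal_analyze_code_changes : Prop := ∀ (files : List String), Dom_analyze_code_changes files → Spec_analyze_code_changes files (analyze_code_changes files)

-- ===== LEMMAS AND PROOFS =====
-- Each flag of A's fold is its initial value OR-ed with B's any()-scan of that category.
theorem pvFoldA_eq (files : List String) (b1 b2 b3 b4 b5 b6 b7 b8 b9 : Bool) :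
    files.foldl pvStepA ⟨b1, b2, b3, b4, b5, b6, b7, b8, b9⟩ =
      ⟨b1 || (files.map PySem.Str.lower).any (fun s => PySem.Str.isIn "routers" s || PySem.Str.isIn "/api/" s),
       b2 || (files.map PySem.Str.lower).any (fun s => PySem.Str.isIn "schemas" s),
       b3 || (files.map PySem.Str.lower).any (fun s => PySem.Str.isIn "models" s),
       b4 || (files.map PySem.Str.lower).any (fun s => PySem.Str.isIn "services" s),
       b5 || (files.map PySem.Str.lower).any (fun s => PySem.Str.isIn "components" s),
       b6 || (files.map PySem.Str.lower).any (fun s => PySem.Str.isIn "page" s && PySem.Str.isIn ".tsx" s),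
       b7 || (files.map PySem.Str.lower).any (fun s => PySem.Str.isIn "hooks" s),
       b8 || (files.map PySem.Str.lower).any (fun s => PySem.Str.isIn "/api/" s || PySem.Str.isIn "apiclient" s),
       b9 || (files.map PySem.Str.lower).any (fun s => PySem.Str.isIn "mobile_app" s)⟩ := by
  induction files generalizing b1 b2 b3 b4 b5 b6 b7 b8 b9 with
  | nil => simp
  | cons f rest ih =>
      simp only [List.foldl_cons, List.map_cons, List.any_cons, pvStepA, ih, Bool.or_assoc]

-- ===== VERDICT (by name: the statement is the Claim_ definition above) =====
theorem analyze_code_changes_spec : Claim_equal_analyze_code_changes := by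
  intro files _
  unfold Spec_analyze_code_changes analyze_code_changes analyze_code_changes_alt
  simp [pvFoldA_eq]
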